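-- pv_equiv track=rewrite | github.com/njworange/make_yaml | services/provider_service.py | sanitize_ebs_episode_summaries
-- ===== SOURCE A (Python) =====
-- def sanitize_ebs_episode_summaries(episodes):
--     if not episodes:
--         return episodes
--     seen_summaries = {}
--     for episode in episodes:
--         summary = (episode.get('summary') or '').strip()
--         if not summary:
--             continue
--         seen_summaries.setdefault(summary, []).append(episode)
--     for summary, grouped_episodes in seen_summaries.items():
--         if len(grouped_episodes) < 2:
--             continue
--         first_episode = grouped_episodes[0]
--         for episode in grouped_episodes[1:]:
--             if episode.get('code') != first_episode.get('code'):
--                 episode['summary'] = ''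
--     return episodes
-- ===== SOURCE B (Python) =====
-- def sanitize_ebs_episode_summaries(episodes):
--     if not episodes:
--         return episodes
--     first_seen = {}
--     for episode in episodes:
--         summary = (episode.get('summary') or '').strip()
--         if not summary:
--             continue
--         rep = first_seen.get(summary)
--         if rep is None:
--             first_seen[summary] = episode
--         elif episode.get('code') != rep.get('code'):
--             episode['summary'] = ''
--     return episodes
-- ===== Notes on version B (the rewrite author's own statement) =====
-- stated objective: simpler
-- what changed: Replaces A's two passes (group all episodes per summary into dict-of-lists, then re-scan each group blanking mismatching codes) by one pass that keeps only the first-seen episode per summary and blanks a later duplicate immediately when its code differs.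
import Mathlib
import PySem

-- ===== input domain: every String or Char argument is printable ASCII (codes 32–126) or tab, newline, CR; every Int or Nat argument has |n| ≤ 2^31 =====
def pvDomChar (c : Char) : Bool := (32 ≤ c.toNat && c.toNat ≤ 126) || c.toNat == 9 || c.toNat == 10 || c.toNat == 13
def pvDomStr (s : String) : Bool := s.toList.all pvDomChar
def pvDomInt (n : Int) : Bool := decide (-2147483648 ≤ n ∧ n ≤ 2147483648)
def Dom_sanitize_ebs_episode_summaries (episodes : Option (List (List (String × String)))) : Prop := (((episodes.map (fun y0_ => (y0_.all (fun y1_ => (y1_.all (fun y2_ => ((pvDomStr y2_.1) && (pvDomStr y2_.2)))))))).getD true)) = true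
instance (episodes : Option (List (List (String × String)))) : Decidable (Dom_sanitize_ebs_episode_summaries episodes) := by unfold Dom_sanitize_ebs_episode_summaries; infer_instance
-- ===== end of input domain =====

-- B merges A's two passes (group per summary into dict-of-lists, then blank mismatching
-- codes inside each group) into one pass keeping only the first-seen episode per summary;
-- objective: simpler. Both Pythons mutate the episode dicts in place the same way; the
-- equivalence proved here is about the returned value.

-- shared accessors: both Pythons contain the same expressions
-- `(episode.get('summary') or '').strip()`, `episode.get('code')`, `episode['summary'] = ''`
def pvSum (e : List (String × String)) : String :=
  PySem.Str.strip (((PySem.Dict.mk e).get? "summary").getD "")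
def pvCode (e : List (String × String)) : Option String :=
  (PySem.Dict.mk e).get? "code"
def pvBlank (e : List (String × String)) : List (String × String) :=
  ((PySem.Dict.mk e).insert "summary" "").items

-- ===== PORT A =====
-- Python A groups the episode dict OBJECTS per summary and mutates them through the
-- aliases; the port models that aliasing by grouping list INDICES and updating the
-- episode list at those indices.
def sanitize_ebs_episode_summaries (episodes : Option (List (List (String × String)))) : Option (List (List (String × String))) :=
  match episodes with
  | none => none                                   -- `if not episodes: return episodes`
  | some l =>
    if l.isEmpty then some l
    else
      -- first loop: seen_summaries.setdefault(summary, []).append(episode)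
      let seen : PySem.Dict String (List Nat) :=
        l.zipIdx.foldl (fun d p =>
          let s := pvSum p.1
          if s = "" then d
          else d.modify s [] (fun g => g ++ [p.2])) PySem.Dict.empty
      -- second loop: over seen_summaries.items(), blank duplicates with a different code
      let l2 := seen.items.foldl (fun arr g =>
        if g.2.length < 2 then arr
        else
          match g.2 with
          | [] => arr
          | fi :: rest =>
            rest.foldl (fun arr i =>
              if pvCode (arr.getD i []) ≠ pvCode (arr.getD fi []) then
                arr.set i (pvBlank (arr.getD i []))
              else arr) arr) l
      some l2

-- ===== PORT B =====
-- single pass; first_seen maps each nonempty stripped summary to the first episode seen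
def sanitize_ebs_episode_summaries_alt (episodes : Option (List (List (String × String)))) : Option (List (List (String × String))) :=
  match episodes with
  | none => none
  | some l =>
    if l.isEmpty then some l
    else
      some (l.foldl (fun (st : List (List (String × String)) × PySem.Dict String (List (String × String))) e =>
        let s := pvSum e
        if s = "" then (st.1 ++ [e], st.2)
        else
          match st.2.get? s with
          | none => (st.1 ++ [e], st.2.insert s e)
          | some rep =>
            if pvCode e ≠ pvCode rep then (st.1 ++ [pvBlank e], st.2)
            else (st.1 ++ [e], st.2)) ([], PySem.Dict.empty)).1

-- ===== PRECONDITION & SPEC =====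
def Spec_sanitize_ebs_episode_summaries (episodes : Option (List (List (String × String)))) (out : Option (List (List (String × String)))) : Prop := out = sanitize_ebs_episode_summaries_alt episodes
instance (episodes : Option (List (List (String × String)))) (out : Option (List (List (String × String)))) : Decidable (Spec_sanitize_ebs_episode_summaries episodes out) := by unfold Spec_sanitize_ebs_episode_summaries; infer_instance

-- ===== CLAIM (what is proved, stated in full; the proofs are below) =====
def Claim_equal_sanitize_ebs_episode_summaries : Prop := ∀ (episodes : Option (List (List (String × String)))), Dom_sanitize_ebs_episode_summaries episodes → Spec_sanitize_ebs_episode_summaries episodes (sanitize_ebs_episode_summaries episodes)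

-- ===== LEMMAS AND PROOFS =====

-- the pointwise description both sides are reduced to: an episode is blanked iff an
-- earlier episode has the same nonempty stripped summary and the FIRST such one has a
-- different code
def pvTr (pre : List (List (String × String))) (e : List (String × String)) : List (String × String) :=
  if pvSum e = "" then e
  else
    match pre.find? (fun x => pvSum x == pvSum e) with
    | none => e
    | some rep => if pvCode e ≠ pvCode rep then pvBlank e else e

def pvSpecGo (pre : List (List (String × String))) : List (List (String × String)) → List (List (String × String))
  | [] => []
  | e :: r => pvTr pre e :: pvSpecGo (pre ++ [e]) r

-- l with the episodes at indices satisfying f blanked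

-- l with the episodes at indices satisfying f blanked
def pvArrOf (l : List (List (String × String))) (f : Nat → Bool) : List (List (String × String)) :=
  l.zipIdx.map (fun p => if f p.2 then pvBlank p.1 else p.1)

-- the blanking predicate one group (summary, index list) contributes

-- the blanking predicate one group (summary, index list) contributes
def pvGB (l : List (List (String × String))) (g : String × List Nat) (j : Nat) : Bool :=
  match g.2 with
  | [] => false
  | fi :: rest => rest.contains j && decide (pvCode (l.getD j []) ≠ pvCode (l.getD fi []))

-- basic facts about the accessors

theorem pvCode_blank (e : List (String × String)) : pvCode (pvBlank e) = pvCode e := by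
  simp [pvCode, pvBlank, PySem.Dict.get?_insert_of_ne _ _ (by decide : ("code":String) ≠ "summary")]

theorem pvBlank_blank (e : List (String × String)) : pvBlank (pvBlank e) = pvBlank e := by
  exact congrArg PySem.Dict.items (PySem.Dict.insert_insert_self (PySem.Dict.mk e) "summary" "" "")

theorem pvArrOf_false (l : List (List (String × String))) : pvArrOf l (fun _ => false) = l := by
  simp [pvArrOf]

theorem length_pvArrOf (l : List (List (String × String))) (f : Nat → Bool) :
    (pvArrOf l f).length = l.length := by
  simp [pvArrOf]

theorem getElem_pvArrOf (l : List (List (String × String))) (f : Nat → Bool) (i : Nat)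
    (h : i < (pvArrOf l f).length) (h' : i < l.length) :
    (pvArrOf l f)[i] = if f i then pvBlank l[i] else l[i] := by
  simp [pvArrOf]

theorem getD_pvArrOf (l : List (List (String × String))) (f : Nat → Bool) (i : Nat) (h : i < l.length) :
    (pvArrOf l f).getD i [] = if f i then pvBlank l[i] else l[i] := by
  rw [List.getD_eq_getElem _ _ (by simpa [length_pvArrOf])]
  exact getElem_pvArrOf l f i (by simpa [length_pvArrOf]) h

theorem pvArrOf_congr (l : List (List (String × String))) (f g : Nat → Bool)
    (h : ∀ j < l.length, f j = g j) : pvArrOf l f = pvArrOf l g := by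
  apply List.ext_getElem (by simp [length_pvArrOf])
  intro i h1 h2
  rw [getElem_pvArrOf l f i h1 (by simpa [length_pvArrOf] using h1),
      getElem_pvArrOf l g i h2 (by simpa [length_pvArrOf] using h2),
      h i (by simpa [length_pvArrOf] using h1)]

theorem set_pvArrOf (l : List (List (String × String))) (f : Nat → Bool) (i : Nat) (h : i < l.length) :
    (pvArrOf l f).set i (pvBlank ((pvArrOf l f).getD i [])) =
      pvArrOf l (fun j => j == i || f j) := by
  apply List.ext_getElem (by simp [length_pvArrOf])
  intro k h1 h2
  have hk : k < l.length := by simpa [length_pvArrOf] using h2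
  rw [getElem_pvArrOf l _ k h2 hk]
  by_cases hki : k = i
  · subst hki
    rw [List.getElem_set_self (by simpa [length_pvArrOf] using h)]
    rw [getD_pvArrOf l f k hk]
    by_cases hf : f k <;> simp [hf, pvBlank_blank]
  · rw [List.getElem_set_ne (by omega)]
    rw [getElem_pvArrOf l f k (by simpa [length_pvArrOf] using hk) hk]
    simp [hki]

theorem pvInner (l : List (List (String × String))) (f : Nat → Bool) (fi : Nat) (hfi : fi < l.length)
    (rest : List Nat) (hr : ∀ i ∈ rest, i < l.length) :
    rest.foldl (fun arr i =>
        if pvCode (arr.getD i []) ≠ pvCode (arr.getD fi []) then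
          arr.set i (pvBlank (arr.getD i []))
        else arr) (pvArrOf l f) =
      pvArrOf l (fun j => f j || (rest.contains j && decide (pvCode (l.getD j []) ≠ pvCode (l.getD fi [])))) := by
  induction rest generalizing f with
  | nil => simp
  | cons i rest ih =>
    have hi : i < l.length := hr i (by simp)
    have hr' : ∀ j ∈ rest, j < l.length := fun j hj => hr j (by simp [hj])
    have hcd : ∀ g : Nat → Bool, pvCode ((pvArrOf l g).getD i []) = pvCode (l.getD i []) := by
      intro g
      rw [getD_pvArrOf l g i hi, List.getD_eq_getElem _ _ hi]
      by_cases hg : g i <;> simp [hg, pvCode_blank]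
    have hcf : ∀ g : Nat → Bool, pvCode ((pvArrOf l g).getD fi []) = pvCode (l.getD fi []) := by
      intro g
      rw [getD_pvArrOf l g fi hfi, List.getD_eq_getElem _ _ hfi]
      by_cases hg : g fi <;> simp [hg, pvCode_blank]
    simp only [List.foldl_cons]
    by_cases hc : pvCode (l.getD i []) ≠ pvCode (l.getD fi [])
    · rw [if_pos (by rw [hcd, hcf]; exact hc), set_pvArrOf l f i hi, ih _ hr']
      apply pvArrOf_congr
      intro j _
      by_cases hji : j = i
      · subst hji
        simp only [List.getD] at hc ⊢
        simp [hc]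
      · simp [hji, Bool.or_assoc]
    · rw [if_neg (by rw [hcd, hcf]; exact hc), ih f hr']
      apply pvArrOf_congr
      intro j _
      by_cases hji : j = i
      · subst hji
        rw [not_not] at hc
        simp only [List.getD] at hc ⊢
        simp [hc]
      · simp [hji]

theorem pvOuter (l : List (List (String × String))) (gs : List (String × List Nat))
    (hg : ∀ p ∈ gs, ∀ i ∈ p.2, i < l.length) (f : Nat → Bool) :
    gs.foldl (fun arr g =>
        if g.2.length < 2 then arr
        else
          match g.2 with
          | [] => arr
          | fi :: rest =>
            rest.foldl (fun arr i =>
              if pvCode (arr.getD i []) ≠ pvCode (arr.getD fi []) then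
                arr.set i (pvBlank (arr.getD i []))
              else arr) arr) (pvArrOf l f) =
      pvArrOf l (fun j => f j || gs.any (fun g => pvGB l g j)) := by
  induction gs generalizing f with
  | nil => simp
  | cons g gs ih =>
    have hg1 : ∀ i ∈ g.2, i < l.length := hg g (by simp)
    have hg' : ∀ p ∈ gs, ∀ i ∈ p.2, i < l.length := fun p hp => hg p (by simp [hp])
    simp only [List.foldl_cons]
    by_cases hlen : g.2.length < 2
    · rw [if_pos hlen, ih hg']
      apply pvArrOf_congr
      intro j _
      have : pvGB l g j = false := by
        match hgg : g.2 with
        | [] => simp [pvGB, hgg]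
        | [fi] => simp [pvGB, hgg]
        | fi :: i :: rest => rw [hgg] at hlen; simp at hlen
      simp [this]
    · rw [if_neg hlen]
      match hgg : g.2 with
      | [] => rw [hgg] at hlen; simp at hlen
      | fi :: rest =>
        have hfi : fi < l.length := hg1 fi (by simp [hgg])
        have hrest : ∀ i ∈ rest, i < l.length := fun i hi => hg1 i (by simp [hgg, hi])
        have hstep : (match fi :: rest with
            | [] => pvArrOf l f
            | fi :: rest => List.foldl (fun arr i =>
                if pvCode (arr.getD i []) ≠ pvCode (arr.getD fi []) then
                  arr.set i (pvBlank (arr.getD i []))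
                else arr) (pvArrOf l f) rest) =
            pvArrOf l (fun j => f j || (rest.contains j && decide (pvCode (l.getD j []) ≠ pvCode (l.getD fi [])))) :=
          pvInner l f fi hfi rest hrest
        rw [hstep, ih hg']
        apply pvArrOf_congr
        intro j _
        simp [pvGB, hgg, Bool.or_assoc]

theorem length_pvSpecGo (pre rest : List (List (String × String))) :
    (pvSpecGo pre rest).length = rest.length := by
  induction rest generalizing pre with
  | nil => rfl
  | cons e r ih => simp [pvSpecGo, ih]

theorem getElem_pvSpecGo (pre rest : List (List (String × String))) (k : Nat) (hk : k < rest.length)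
    (hk' : k < (pvSpecGo pre rest).length) :
    (pvSpecGo pre rest)[k] = pvTr (pre ++ rest.take k) rest[k] := by
  induction rest generalizing pre k with
  | nil => simp at hk
  | cons e r ih =>
    match k with
    | 0 => simp [pvSpecGo]
    | k + 1 =>
      simp only [pvSpecGo, List.getElem_cons_succ, List.take_succ_cons]
      rw [ih (pre ++ [e]) k (by simpa using hk) (by simpa [length_pvSpecGo] using hk)]
      simp

theorem pvFind_singleton_none {s : String} {e : List (String × String)} (h : pvSum e ≠ s) :
    [e].find? (fun x => pvSum x == s) = none := by
  have hne : (pvSum e == s) = false := beq_eq_false_iff_ne.mpr h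
  simp [List.find?, hne]

theorem pvFind_append_singleton (pre : List (List (String × String))) {s : String}
    {e : List (String × String)} (h : pvSum e ≠ s) :
    (pre ++ [e]).find? (fun x => pvSum x == s) = pre.find? (fun x => pvSum x == s) := by
  rw [List.find?_append, pvFind_singleton_none h]
  cases pre.find? (fun x => pvSum x == s) <;> rfl

theorem pvB_fold (rest acc : List (List (String × String))) (fs : PySem.Dict String (List (String × String)))
    (pre : List (List (String × String)))
    (hinv : ∀ s : String, s ≠ "" → fs.get? s = pre.find? (fun x => pvSum x == s)) :
    (rest.foldl (fun (st : List (List (String × String)) × PySem.Dict String (List (String × String))) e =>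
        let s := pvSum e
        if s = "" then (st.1 ++ [e], st.2)
        else
          match st.2.get? s with
          | none => (st.1 ++ [e], st.2.insert s e)
          | some rep =>
            if pvCode e ≠ pvCode rep then (st.1 ++ [pvBlank e], st.2)
            else (st.1 ++ [e], st.2)) (acc, fs)).1 = acc ++ pvSpecGo pre rest := by
  induction rest generalizing acc fs pre with
  | nil => simp [pvSpecGo]
  | cons e r ih =>
    simp only [List.foldl_cons, pvSpecGo]
    by_cases hs : pvSum e = ""
    · rw [if_pos hs]
      rw [ih (acc ++ [e]) fs (pre ++ [e]) ?_]
      · simp [pvTr, hs]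
      · intro s hsne
        rw [hinv s hsne, pvFind_append_singleton pre (by rw [hs]; exact Ne.symm hsne)]
    · rw [if_neg hs]
      rcases hrep : fs.get? (pvSum e) with _ | rep
      · simp only []
        rw [ih (acc ++ [e]) (fs.insert (pvSum e) e) (pre ++ [e]) ?_]
        · have hfind : pre.find? (fun x => pvSum x == pvSum e) = none := by
            rw [← hinv _ hs]; exact hrep
          simp [pvTr, hs, hfind]
        · intro s hsne
          rw [PySem.Dict.get?_insert, List.find?_append]
          by_cases hse : s = pvSum e
          · subst hse
            rw [if_pos rfl]
            have hfind : pre.find? (fun x => pvSum x == pvSum e) = none := by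
              rw [← hinv _ hs]; exact hrep
            simp [hfind, List.find?]
          · rw [if_neg hse, hinv s hsne,
                pvFind_singleton_none (fun h => hse h.symm)]
            cases hpre : pre.find? (fun x => pvSum x == s) <;> rfl
      · simp only []
        have hfind : pre.find? (fun x => pvSum x == pvSum e) = some rep := by
          rw [← hinv _ hs]; exact hrep
        have hinv' : ∀ s : String, s ≠ "" → fs.get? s = (pre ++ [e]).find? (fun x => pvSum x == s) := by
          intro s hsne
          by_cases hse : s = pvSum e
          · subst hse
            rw [List.find?_append, hfind, hrep]
            rfl
          · rw [pvFind_append_singleton pre (fun h => hse h.symm), hinv s hsne]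
        by_cases hc : pvCode e ≠ pvCode rep
        · rw [if_pos hc, ih (acc ++ [pvBlank e]) fs (pre ++ [e]) hinv']
          simp [pvTr, hs, hfind, hc]
        · rw [if_neg hc, ih (acc ++ [e]) fs (pre ++ [e]) hinv']
          simp [pvTr, hs, hfind, hc]
-- ===== A side =====

def pvE (l : List (List (String × String))) : List (List (String × String) × Nat) :=
  l.zipIdx.filter (fun p => decide ¬(pvSum p.1 = ""))

def pvIdxs (l : List (List (String × String))) (s : String) : List Nat :=
  ((pvE l).filter (fun p => pvSum p.1 == s)).map (fun p => p.2)

def pvSeen (l : List (List (String × String))) : PySem.Dict String (List Nat) :=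
  ((pvE l).map (fun p => (pvSum p.1, p.2))).foldl
    (fun d q => d.modify q.1 [] (fun g => g ++ [q.2])) PySem.Dict.empty

theorem mem_pvIdxs (l : List (List (String × String))) (s : String) (j : Nat) :
    j ∈ pvIdxs l s ↔ (j < l.length ∧ pvSum (l.getD j []) ≠ "" ∧ pvSum (l.getD j []) = s) := by
  simp only [pvIdxs, pvE, List.mem_map, List.mem_filter, List.filter_filter]
  constructor
  · rintro ⟨p, ⟨hz, hf⟩, rfl⟩
    have := List.mem_zipIdx_iff_getElem?.mp hz
    have hlt : p.2 < l.length := by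
      by_contra hge
      rw [List.getElem?_eq_none (by omega)] at this
      simp at this
    have hp1 : p.1 = l.getD p.2 [] := by
      rw [List.getD_eq_getElem?_getD, this]; rfl
    simp only [Bool.and_eq_true, decide_eq_true_eq, beq_iff_eq] at hf
    exact ⟨hlt, hp1 ▸ hf.2, hp1 ▸ hf.1⟩
  · rintro ⟨hlt, hne, hs⟩
    refine ⟨(l.getD j [], j), ⟨List.mem_zipIdx_iff_getElem?.mpr ?_, ?_⟩, rfl⟩
    · simp [List.getD_eq_getElem?_getD, List.getElem?_eq_getElem hlt]
    · simp only [Bool.and_eq_true, decide_eq_true_eq, beq_iff_eq]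
      exact ⟨hs, hne⟩

theorem pairwise_pvIdxs (l : List (List (String × String))) (s : String) :
    (pvIdxs l s).Pairwise (· < ·) := by
  have h0 : l.zipIdx.Pairwise (fun p q => p.2 < q.2) := by
    rw [← List.pairwise_map (f := Prod.snd), List.zipIdx_map_snd]
    exact List.pairwise_lt_range' 1
  unfold pvIdxs pvE
  rw [List.pairwise_map]
  exact (h0.filter _).filter _

theorem pvFind_take_none {α : Type} [Inhabited α] (l : List α) (p : α → Bool) (j : Nat)
    (h : ∀ i, i < j → i < l.length → ¬ p (l.getD i default)) :
    (l.take j).find? p = none := by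
  rw [List.find?_eq_none]
  intro x hx
  obtain ⟨i, hi, hx⟩ := List.getElem_of_mem hx
  have hi1 : i < j := by simp at hi; omega
  have hi2 : i < l.length := by simp at hi; omega
  have : x = l.getD i default := by
    rw [List.getD_eq_getElem _ _ hi2, ← hx, List.getElem_take]
  rw [this]
  exact h i hi1 hi2

theorem pvFind_take_first {α : Type} [Inhabited α] (l : List α) (p : α → Bool) (j j0 : Nat)
    (hj0 : j0 < l.length) (hlt : j0 < j) (hp : p (l.getD j0 default))
    (hmin : ∀ i, i < j0 → i < l.length → ¬ p (l.getD i default)) :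
    (l.take j).find? p = some (l.getD j0 default) := by
  rw [List.find?_eq_some_iff_append]
  refine ⟨hp, (l.take j0), (l.drop (j0+1)).take (j - (j0+1)), ?_, ?_⟩
  · rw [List.getD_eq_getElem _ _ hj0]
    have h1 : j = j0 + (j - j0) := by omega
    conv_lhs => rw [h1]
    rw [List.take_add]
    congr 1
    rw [List.drop_eq_getElem_cons hj0]
    have h2 : j - j0 = (j - (j0+1)) + 1 := by omega
    rw [h2, List.take_succ_cons]
  · intro a ha
    obtain ⟨i, hi, hx⟩ := List.getElem_of_mem ha
    have hi1 : i < j0 := by simp at hi; omega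
    have hi2 : i < l.length := by omega
    have : a = l.getD i default := by
      rw [List.getD_eq_getElem _ _ hi2, ← hx, List.getElem_take]
    rw [this]
    simpa using hmin i hi1 hi2

theorem mem_of_mem_pvIdxs_tail (l : List (List (String × String))) (s : String) (j fi : Nat)
    (rest : List Nat) (hI : pvIdxs l s = fi :: rest) (hj : j ∈ rest) : j ∈ pvIdxs l s := by
  rw [hI]; exact List.mem_cons_of_mem _ hj

theorem pvSum_mem_keys (l : List (List (String × String))) (j : Nat) (s : String)
    (hj : j ∈ pvIdxs l s) : s ∈ (pvE l).map (fun p => pvSum p.1) := by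
  unfold pvIdxs at hj
  simp only [List.mem_map, List.mem_filter] at hj
  obtain ⟨p, ⟨hp, hps⟩, _⟩ := hj
  exact List.mem_map.mpr ⟨p, hp, beq_iff_eq.mp hps⟩

theorem pvPointwise (l : List (List (String × String))) (j : Nat) (hj : j < l.length)
    (keys : List String)
    (hmem : ∀ s : String, s ∈ keys ↔ s ∈ (pvE l).map (fun p => pvSum p.1)) :
    (if keys.any (fun s => pvGB l (s, pvIdxs l s) j) then pvBlank l[j] else l[j]) =
      pvTr (l.take j) l[j] := by
  have hgd : l.getD j [] = l[j] := List.getD_eq_getElem _ _ hj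
  by_cases hs0 : pvSum l[j] = ""
  · have hany : keys.any (fun s => pvGB l (s, pvIdxs l s) j) = false := by
      rw [List.any_eq_false]
      intro s _
      cases hI : pvIdxs l s with
      | nil => simp [pvGB]
      | cons fi rest =>
        have hnj : j ∉ rest := by
          intro hjr
          have := (mem_pvIdxs l s j).mp (mem_of_mem_pvIdxs_tail l s j fi rest hI hjr)
          rw [hgd] at this
          exact this.2.1 hs0
        simp [pvGB, hnj]
    rw [hany]
    simp [pvTr, hs0]
  · have hjI : j ∈ pvIdxs l (pvSum l[j]) := by
      rw [mem_pvIdxs, hgd]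
      exact ⟨hj, hs0, rfl⟩
    cases hI : pvIdxs l (pvSum l[j]) with
    | nil => rw [hI] at hjI; simp at hjI
    | cons j0 restI =>
      rw [hI] at hjI
      have hpw := pairwise_pvIdxs l (pvSum l[j])
      rw [hI, List.pairwise_cons] at hpw
      have hj0I : j0 ∈ pvIdxs l (pvSum l[j]) := by rw [hI]; exact List.mem_cons_self
      rw [mem_pvIdxs] at hj0I
      obtain ⟨hj0n, hj0ne, hj0s⟩ := hj0I
      have hmin : ∀ i, i < j0 → i < l.length → pvSum (l.getD i []) ≠ pvSum l[j] := by
        intro i hi hin habs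
        have hiI : i ∈ pvIdxs l (pvSum l[j]) := by
          rw [mem_pvIdxs]
          exact ⟨hin, by rw [habs]; exact hs0, habs⟩
        rw [hI] at hiI
        rcases List.mem_cons.mp hiI with rfl | hiR
        · omega
        · exact absurd (hpw.1 i hiR) (by omega)
      by_cases hjj0 : j = j0
      · subst hjj0
        have hany : keys.any (fun s => pvGB l (s, pvIdxs l s) j) = false := by
          rw [List.any_eq_false]
          intro s _
          cases hI' : pvIdxs l s with
          | nil => simp [pvGB]
          | cons fi rest =>
            have hnj : j ∉ rest := by
              intro hjr
              have hjs := (mem_pvIdxs l s j).mp (mem_of_mem_pvIdxs_tail l s j fi rest hI' hjr)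
              rw [hgd] at hjs
              rw [hjs.2.2] at hI
              rw [hI] at hI'
              obtain ⟨rfl, rfl⟩ : j = fi ∧ restI = rest := by
                exact ⟨(List.cons.injEq _ _ _ _).mp hI' |>.1, (List.cons.injEq _ _ _ _).mp hI' |>.2⟩
              exact absurd (hpw.1 j hjr) (by omega)
            simp [pvGB, hnj]
        rw [hany]
        have hfind : (l.take j).find? (fun x => pvSum x == pvSum l[j]) = none := by
          apply pvFind_take_none
          intro i hi hin
          simpa using hmin i hi hin
        simp [pvTr, hs0, hfind]
      · have hjR : j ∈ restI := by
          rcases List.mem_cons.mp hjI with rfl | h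
          · exact absurd rfl hjj0
          · exact h
        have hj0j : j0 < j := hpw.1 j hjR
        have hany : keys.any (fun s => pvGB l (s, pvIdxs l s) j) =
            decide (pvCode (l.getD j []) ≠ pvCode (l.getD j0 [])) := by
          by_cases hc : pvCode (l.getD j []) ≠ pvCode (l.getD j0 [])
          · rw [decide_eq_true hc, List.any_eq_true]
            refine ⟨pvSum l[j], (hmem _).mpr (pvSum_mem_keys l j _ (by rw [hI]; exact hjI)), ?_⟩
            have hc' := hc
            simp only [List.getD] at hc'
            simp [pvGB, hI, hjR, hc']
          · rw [decide_eq_false hc, List.any_eq_false]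
            intro s _
            cases hI' : pvIdxs l s with
            | nil => simp [pvGB]
            | cons fi rest =>
              by_cases hjr : j ∈ rest
              · have hjs := (mem_pvIdxs l s j).mp (mem_of_mem_pvIdxs_tail l s j fi rest hI' hjr)
                rw [hgd] at hjs
                rw [hjs.2.2] at hI
                rw [hI] at hI'
                obtain ⟨rfl, rfl⟩ : j0 = fi ∧ restI = rest := by
                  exact ⟨(List.cons.injEq _ _ _ _).mp hI' |>.1, (List.cons.injEq _ _ _ _).mp hI' |>.2⟩
                have hc' := hc
                rw [not_not] at hc'
                simp only [List.getD] at hc'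
                simp [pvGB, hc']
              · simp [pvGB, hjr]
        rw [hany]
        have hfind : (l.take j).find? (fun x => pvSum x == pvSum l[j]) = some (l.getD j0 []) := by
          apply pvFind_take_first l _ j j0 hj0n hj0j
          · simpa using hj0s
          · intro i hi hin
            simpa using hmin i hi hin
        rw [pvTr, if_neg hs0, hfind, hgd]
        by_cases hc : pvCode l[j] ≠ pvCode (l.getD j0 []) <;> simp only [List.getD] at hc ⊢ <;> simp [hc]

theorem pvA_eq_spec (l : List (List (String × String))) :
    ((l.zipIdx.foldl (fun d p =>
          let s := pvSum p.1
          if s = "" then d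
          else d.modify s [] (fun g => g ++ [p.2])) (PySem.Dict.empty : PySem.Dict String (List Nat))).items.foldl (fun arr g =>
        if g.2.length < 2 then arr
        else
          match g.2 with
          | [] => arr
          | fi :: rest =>
            rest.foldl (fun arr i =>
              if pvCode (arr.getD i []) ≠ pvCode (arr.getD fi []) then
                arr.set i (pvBlank (arr.getD i []))
              else arr) arr) l) = pvSpecGo [] l := by
  have hcong : l.zipIdx.foldl (fun d p =>
        let s := pvSum p.1
        if s = "" then d
        else d.modify s [] (fun g => g ++ [p.2])) (PySem.Dict.empty : PySem.Dict String (List Nat))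
      = pvSeen l := by
    unfold pvSeen
    rw [List.foldl_map]
    unfold pvE
    rw [← PySem.List.foldl_ite_eq_foldl_filter (p := fun p : List (String × String) × Nat => ¬ (pvSum p.1 = ""))
          (f := fun (d : PySem.Dict String (List Nat)) p => d.modify (pvSum p.1) [] (fun g => g ++ [p.2]))]
    apply PySem.List.foldl_congr_mem
    intro acc x _
    by_cases h : pvSum x.1 = "" <;> simp [h]
  rw [hcong]
  have hgetD : ∀ s, (pvSeen l).getD s [] = pvIdxs l s := by
    intro s
    unfold pvSeen
    rw [PySem.Dict.getD_foldl_modify_append, PySem.Dict.getD_empty]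
    unfold pvIdxs
    rw [List.filter_map, List.map_map]
    rfl
  have hnodup : (pvSeen l).keys.Nodup := by
    unfold pvSeen
    exact PySem.Dict.nodup_keys_foldl_modify_key _ _ _ _ _ (by simp [PySem.Dict.keys_empty])
  have hitems : (pvSeen l).items = (pvSeen l).keys.map (fun s => (s, (pvSeen l).getD s [])) :=
    PySem.Dict.items_eq_map_keys (pvSeen l) hnodup []
  have hkeysmem : ∀ s : String, s ∈ (pvSeen l).keys ↔ s ∈ (pvE l).map (fun p => pvSum p.1) := by
    intro s
    unfold pvSeen
    rw [PySem.Dict.keys_foldl_modify_key _ Prod.fst []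
          (fun _ q => fun g => g ++ [q.2]), PySem.Dict.keys_empty]
    have : PySem.Set.update ([] : PySem.Set String) (((pvE l).map (fun p => (pvSum p.1, p.2))).map Prod.fst)
        = PySem.Set.ofList (((pvE l).map (fun p => (pvSum p.1, p.2))).map Prod.fst) := rfl
    rw [this, PySem.Set.mem_ofList, List.map_map]
    rfl
  have hbound : ∀ p ∈ (pvSeen l).items, ∀ i ∈ p.2, i < l.length := by
    intro p hp i hi
    rw [hitems] at hp
    obtain ⟨s, _, rfl⟩ := List.mem_map.mp hp
    rw [hgetD] at hi
    exact ((mem_pvIdxs l s i).mp hi).1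
  have houter := pvOuter l (pvSeen l).items hbound (fun _ => false)
  rw [pvArrOf_false] at houter
  rw [houter]
  apply List.ext_getElem (by simp [length_pvArrOf, length_pvSpecGo])
  intro j h1 h2
  have hj : j < l.length := by simpa [length_pvArrOf] using h1
  rw [getElem_pvArrOf l _ j h1 hj,
      getElem_pvSpecGo [] l j (by simpa [length_pvSpecGo] using h2) h2, List.nil_append]
  have hany : (pvSeen l).items.any (fun g => pvGB l g j)
      = (pvSeen l).keys.any (fun s => pvGB l (s, pvIdxs l s) j) := by
    rw [hitems, List.any_map]
    apply PySem.List.any_congr_mem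
    intro s _
    simp [hgetD]
  simp only [Bool.false_or, hany]
  exact pvPointwise l j hj (pvSeen l).keys hkeysmem

-- ===== VERDICT (by name: the statement is the Claim_ definition above) =====
theorem sanitize_ebs_episode_summaries_spec : Claim_equal_sanitize_ebs_episode_summaries := by
  intro episodes _
  unfold Spec_sanitize_ebs_episode_summaries
  unfold sanitize_ebs_episode_summaries sanitize_ebs_episode_summaries_alt
  match episodes with
  | none => rfl
  | some l =>
    by_cases hl : l.isEmpty
    · simp [hl]
    · simp only [hl, Bool.false_eq_true, if_false]
      rw [pvB_fold l [] PySem.Dict.empty [] (by intro s _; simp [PySem.Dict.get?_empty])]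
      rw [List.nil_append]
      exact congrArg some (pvA_eq_spec l)
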